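-- pv_equiv track=rewrite | github.com/jonghoonok/Algorithm_Study | D3/D3_1491.py | wall
-- ===== SOURCE A (Python) =====
-- def wall(n, a, b):
--     r = n
--     c = 1
--     result = a*(r-c) + b*(n-r*c)
--     while r >0:
--         while r*c <= n and c <= r:
--             temp = a*(r-c) + b*(n-r*c)
--             if result > temp:
--                 result = temp
--             c += 1
--         r -= 1
--         c = 1
--     return result
-- ===== SOURCE B (Python) =====
-- def wall(n, a, b):
--     # cost a*(r-c)+b*(n-r*c) is linear in c, so for each r only an endpoint
--     # c=1 or c=min(r, n//r) can be minimal; one O(1) evaluation per r.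
--     result = a * (n - 1)
--     for r in range(1, n + 1):
--         cmax = min(r, n // r)
--         s = a + b * r
--         c = cmax if s >= 0 else 1
--         temp = a * r + b * n - c * s
--         if temp < result:
--             result = temp
--     return result
-- ===== Notes on version B (the rewrite author's own statement) =====
-- stated objective: faster
-- what changed: A scans every feasible c for each r (sum over r of min(r, n//r) iterations); B notes the cost a*(r-c)+b*(n-r*c) is linear in c and evaluates only the better endpoint c=1 or c=min(r, n//r) for each r, one O(1) step per r.
import Mathlib
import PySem

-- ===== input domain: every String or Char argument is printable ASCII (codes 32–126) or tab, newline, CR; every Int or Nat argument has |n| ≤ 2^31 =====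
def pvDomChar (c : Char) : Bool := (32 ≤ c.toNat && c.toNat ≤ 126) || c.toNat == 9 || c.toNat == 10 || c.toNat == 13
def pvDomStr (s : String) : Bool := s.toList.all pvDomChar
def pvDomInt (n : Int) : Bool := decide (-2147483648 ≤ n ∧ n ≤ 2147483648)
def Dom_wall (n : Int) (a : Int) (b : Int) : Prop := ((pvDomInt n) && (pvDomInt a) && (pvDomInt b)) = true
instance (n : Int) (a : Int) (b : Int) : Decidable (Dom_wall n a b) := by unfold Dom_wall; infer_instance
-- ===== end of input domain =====

-- B replaces A's inner scan over all c with one endpoint evaluation per r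
-- (the cost is linear in c), turning O(n log n) into O(n): objective = faster.


-- ===== PORT A =====
-- inner while loop: 'while r*c <= n and c <= r: …; c += 1'
def wallInner (n a b r : Int) (c : Int) (result : Int) : Int :=
  if h : r * c ≤ n ∧ c ≤ r then
    let temp := a * (r - c) + b * (n - r * c)
    wallInner n a b r (c + 1) (if result > temp then temp else result)
  else result
termination_by (r + 1 - c).toNat
decreasing_by omega

-- outer while loop: 'while r > 0: <inner with c = 1>; r -= 1'
def wallOuter (n a b : Int) (r : Int) (result : Int) : Int :=
  if _h : r > 0 then wallOuter n a b (r - 1) (wallInner n a b r 1 result) else result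
termination_by r.toNat
decreasing_by omega

def wall (n : Int) (a : Int) (b : Int) : Int :=
  wallOuter n a b n (a * (n - 1) + b * (n - n * 1))

-- ===== PORT B =====
def wall_alt (n : Int) (a : Int) (b : Int) : Int :=
  (PySem.List.pyRange 1 (n + 1) 1).foldl
    (fun result r =>
      let cmax := min r (PySem.Int.floordiv n r)
      let s := a + b * r
      let c := if s ≥ 0 then cmax else 1
      let temp := a * r + b * n - c * s
      if temp < result then temp else result)
    (a * (n - 1))

-- ===== PRECONDITION & SPEC =====
def Spec_wall (n : Int) (a : Int) (b : Int) (out : Int) : Prop := out = wall_alt n a b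
instance (n : Int) (a : Int) (b : Int) (out : Int) : Decidable (Spec_wall n a b out) := by unfold Spec_wall; infer_instance

-- ===== CLAIM (what is proved, stated in full; the proofs are below) =====
def Claim_equal_wall : Prop := ∀ (n : Int) (a : Int) (b : Int), Dom_wall n a b → Spec_wall n a b (wall n a b)

-- ===== LEMMAS AND PROOFS =====

-- the per-r candidate value B contributes: the better endpoint of the linear cost
def gWall (n a b r : Int) : Int :=
  a * r + b * n - (if a + b * r ≥ 0 then min r (PySem.Int.floordiv n r) else 1) * (a + b * r)

theorem ite_lt_eq_min (x y : Int) : (if y < x then y else x) = min x y := by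
  rw [min_def]; split_ifs <;> omega

-- the inner-loop condition is exactly c ≤ min r (n // r)
theorem wall_cond_iff (n r c : Int) (hr : 0 < r) :
    (r * c ≤ n ∧ c ≤ r) ↔ c ≤ min r (PySem.Int.floordiv n r) := by
  rw [le_min_iff, PySem.Int.le_floordiv_iff_mul_le hr, mul_comm r c]
  tauto

theorem wallInner_eq (n a b r : Int) (hr : 1 ≤ r) :
    ∀ (k : Nat) (c res : Int), 1 ≤ c → c ≤ min r (PySem.Int.floordiv n r) →
      (min r (PySem.Int.floordiv n r) + 1 - c).toNat = k →
      wallInner n a b r c res =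
        min res (a * r + b * n -
          (if a + b * r ≥ 0 then min r (PySem.Int.floordiv n r) else c) * (a + b * r)) := by
  intro k
  induction k with
  | zero => intro c res h1 h2 hk; omega
  | succ k ih =>
    intro c res h1 h2 hk
    have hcond : r * c ≤ n ∧ c ≤ r := (wall_cond_iff n r c (by omega)).2 h2
    rw [wallInner, dif_pos hcond]
    have htemp : a * (r - c) + b * (n - r * c) = a * r + b * n - c * (a + b * r) := by ring
    set M := min r (PySem.Int.floordiv n r) with hM
    by_cases hlast : c = M
    · -- c = cmax: the next call's guard fails
      rw [wallInner, dif_neg]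
      · rw [htemp]
        have hstep : (if res > a * r + b * n - c * (a + b * r)
                then a * r + b * n - c * (a + b * r) else res)
             = min res (a * r + b * n - c * (a + b * r)) := by
          rw [min_def]; split_ifs <;> omega
        rw [hstep, hlast]
        split_ifs <;> rfl
      · intro hc
        have := (wall_cond_iff n r (c + 1) (by omega)).1 hc
        omega
    · -- c < cmax: recurse
      have hc1 : c + 1 ≤ M := by omega
      rw [ih (c + 1) _ (by omega) hc1 (by omega)]
      rw [htemp]
      have hstep : (if res > a * r + b * n - c * (a + b * r)
                    then a * r + b * n - c * (a + b * r) else res)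
                 = min res (a * r + b * n - c * (a + b * r)) := by
        rw [min_def]; split_ifs <;> omega
      rw [hstep, min_assoc]
      congr 1
      by_cases hs : a + b * r ≥ 0
      · rw [if_pos hs, if_pos hs]
        have : a * r + b * n - M * (a + b * r) ≤ a * r + b * n - c * (a + b * r) := by
          have : c * (a + b * r) ≤ M * (a + b * r) :=
            mul_le_mul_of_nonneg_right (by omega) hs
          omega
        omega
      · rw [if_neg hs, if_neg hs]
        have : a * r + b * n - c * (a + b * r) ≤ a * r + b * n - (c + 1) * (a + b * r) := by
          nlinarith
        omega

theorem wallInner_one (n a b r : Int) (hr : 1 ≤ r) (hrn : r ≤ n) (res : Int) :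
    wallInner n a b r 1 res = min res (gWall n a b r) := by
  have hcmax : 1 ≤ min r (PySem.Int.floordiv n r) := by
    rw [le_min_iff, PySem.Int.le_floordiv_iff_mul_le (by omega)]
    constructor <;> omega
  rw [wallInner_eq n a b r hr _ 1 res le_rfl hcmax rfl]
  unfold gWall
  rfl

theorem foldl_minstep_comm (n a b : Int) (l : List Int) :
    ∀ res x, List.foldl (fun res r => min res (gWall n a b r)) (min res (gWall n a b x)) l
      = min (List.foldl (fun res r => min res (gWall n a b r)) res l) (gWall n a b x) := by
  induction l with
  | nil => intro res x; rfl
  | cons y t ih =>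
    intro res x
    simp only [List.foldl_cons]
    rw [min_right_comm, ih]

theorem wallOuter_eq (n a b : Int) :
    ∀ (k : Nat) (r res : Int), r.toNat = k → r ≤ n →
      wallOuter n a b r res =
        List.foldl (fun res r => min res (gWall n a b r)) res (PySem.List.pyRange 1 (r + 1) 1) := by
  intro k
  induction k with
  | zero =>
    intro r res hk hrn
    rw [wallOuter, dif_neg (by omega)]
    rw [PySem.List.pyRange_one]
    have : (r + 1 - 1).toNat = 0 := by omega
    rw [this]
    rfl
  | succ k ih =>
    intro r res hk hrn
    have hr : 1 ≤ r := by omega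
    rw [wallOuter, dif_pos (by omega)]
    rw [wallInner_one n a b r hr hrn]
    rw [ih (r - 1) _ (by omega) (by omega)]
    have hrange : PySem.List.pyRange 1 (r + 1) 1 = PySem.List.pyRange 1 r 1 ++ [r] := by
      have := PySem.List.pyRange_one_succ_right (a := 1) (b := r) hr
      simpa using this
    rw [hrange, List.foldl_append]
    simp only [List.foldl_cons, List.foldl_nil]
    have : r - 1 + 1 = r := by omega
    rw [this, foldl_minstep_comm]

theorem wall_alt_eq_fold (n a b : Int) :
    wall_alt n a b =
      List.foldl (fun res r => min res (gWall n a b r)) (a * (n - 1))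
        (PySem.List.pyRange 1 (n + 1) 1) := by
  unfold wall_alt
  congr 1
  funext res r
  dsimp only
  rw [ite_lt_eq_min]
  rfl

-- ===== VERDICT (by name: the statement is the Claim_ definition above) =====
theorem wall_spec : Claim_equal_wall := by
  intro n a b _
  unfold Spec_wall wall
  rw [wall_alt_eq_fold]
  by_cases hn : 1 ≤ n
  · rw [wallOuter_eq n a b n.toNat n _ rfl le_rfl]
    congr 1
    ring
  · rw [wallOuter, dif_neg (by omega)]
    rw [PySem.List.pyRange_one]
    have : (n + 1 - 1).toNat = 0 := by omega
    rw [this]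
    simp only [List.range_zero, List.map_nil, List.foldl_nil]
    ring
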